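-- pv_equiv track=rewrite | github.com/rosogon/nerdle-summle | nerdle.py | check_semi_guessed
-- ===== SOURCE A (Python) =====
-- def check_semi_guessed(solution, semi_guessed):
--     checked = set()
--     for i, ch in enumerate(solution):
--         if ch in semi_guessed:
--             if i in semi_guessed[ch]:
--                 return False
--             checked.add(ch)
--     return len(semi_guessed.keys()) - len(checked) == 0
-- ===== SOURCE B (Python) =====
-- def check_semi_guessed(solution, semi_guessed):
--     for ch, forbidden in semi_guessed.items():
--         occurrences = [i for i, c in enumerate(solution) if c == ch]
--         if not occurrences:
--             return False
--         if any(i in forbidden for i in occurrences):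
--             return False
--     return True
-- ===== Notes on version B (the rewrite author's own statement) =====
-- stated objective: idiomatic
-- what changed: B loops over the constraint dict's items and rescans the solution per key (occurrence list: nonempty and disjoint from the forbidden positions), replacing A's single forward pass over the solution with a checked-set accumulator and a final key count comparison.
import Mathlib
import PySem

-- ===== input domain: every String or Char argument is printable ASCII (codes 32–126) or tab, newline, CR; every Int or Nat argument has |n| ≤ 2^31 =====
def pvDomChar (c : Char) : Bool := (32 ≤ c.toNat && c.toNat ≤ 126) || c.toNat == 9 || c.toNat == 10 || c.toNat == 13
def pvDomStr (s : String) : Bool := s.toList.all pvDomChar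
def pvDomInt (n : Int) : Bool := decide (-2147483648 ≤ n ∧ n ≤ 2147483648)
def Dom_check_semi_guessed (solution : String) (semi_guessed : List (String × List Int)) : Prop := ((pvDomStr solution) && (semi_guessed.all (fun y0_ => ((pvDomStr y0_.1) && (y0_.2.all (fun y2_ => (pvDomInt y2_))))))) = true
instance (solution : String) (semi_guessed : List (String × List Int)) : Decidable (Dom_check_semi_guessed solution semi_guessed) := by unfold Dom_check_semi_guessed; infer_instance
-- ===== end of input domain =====

-- B replaces A's single forward scan over the solution (with a checked-set accumulator and a
-- final key-count comparison) by a per-constraint loop over the dict items that rescans the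
-- solution for each key; return values agree on every dict input (Pre_ excludes only
-- association lists with duplicate keys, which do not represent a Python dict).

-- ===== PORT A =====
-- a char of the solution, as the 1-character string Python's iteration yields
def csgKey (c : Char) : String := String.ofList [c]

-- A's for-loop: state = remaining enumerated chars, the 'checked' set; early return False
def csgLoopA (sg : List (String × List Int)) : List (Int × Char) → PySem.Set String → Bool
  | [], checked =>
      -- return len(semi_guessed.keys()) - len(checked) == 0
      (((PySem.Dict.mk sg).keys.length : Int) - (checked.length : Int)) == 0
  | (i, c) :: rest, checked =>
      match (PySem.Dict.mk sg).get? (csgKey c) with     -- 'ch in semi_guessed' + 'semi_guessed[ch]'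
      | some f => if f.contains i then false            -- 'if i in semi_guessed[ch]: return False'
                  else csgLoopA sg rest (checked.add (csgKey c))
      | none => csgLoopA sg rest checked

def check_semi_guessed (solution : String) (semi_guessed : List (String × List Int)) : Bool :=
  csgLoopA semi_guessed (PySem.List.enumerate solution.toList 0) PySem.Set.empty

-- ===== PORT B =====
-- B's for-loop over the dict items; per key: occurrence indices, nonempty, none forbidden
def csgLoopB (s : List Char) : List (String × List Int) → Bool
  | [] => true
  | (ch, forbidden) :: rest =>
      let occurrences :=
        ((PySem.List.enumerate s 0).filter (fun p => csgKey p.2 == ch)).map Prod.fst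
      if occurrences.isEmpty then false
      else if occurrences.any (fun i => forbidden.contains i) then false
      else csgLoopB s rest

def check_semi_guessed_alt (solution : String) (semi_guessed : List (String × List Int)) : Bool :=
  csgLoopB solution.toList semi_guessed

-- ===== PRECONDITION & SPEC =====
-- Pre_ excludes association lists with duplicate keys: those do not represent a Python dict
-- (A's first-match lookup and key count make their value a representation accident).
def Pre_check_semi_guessed (solution : String) (semi_guessed : List (String × List Int)) : Prop :=
  (semi_guessed.map Prod.fst).Nodup
instance (solution : String) (semi_guessed : List (String × List Int)) : Decidable (Pre_check_semi_guessed solution semi_guessed) := by unfold Pre_check_semi_guessed; infer_instance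

def pvWitness_check_semi_guessed : String × (List (String × List Int)) :=
  ("ab", [("a", [1]), ("b", [0, 2])])

def Spec_check_semi_guessed (solution : String) (semi_guessed : List (String × List Int)) (out : Bool) : Prop := out = check_semi_guessed_alt solution semi_guessed
instance (solution : String) (semi_guessed : List (String × List Int)) (out : Bool) : Decidable (Spec_check_semi_guessed solution semi_guessed out) := by unfold Spec_check_semi_guessed; infer_instance

-- ===== CLAIM (what is proved, stated in full; the proofs are below) =====
def Claim_equal_check_semi_guessed : Prop := ∀ (solution : String) (semi_guessed : List (String × List Int)), Dom_check_semi_guessed solution semi_guessed → Pre_check_semi_guessed solution semi_guessed → Spec_check_semi_guessed solution semi_guessed (check_semi_guessed solution semi_guessed)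

-- ===== LEMMAS AND PROOFS =====

-- the common specification both loops decide
def csgOk (s : List Char) (k : String) (f : List Int) : Prop :=
  (∃ q ∈ PySem.List.enumerate s 0, csgKey q.2 = k) ∧
  (∀ q ∈ PySem.List.enumerate s 0, csgKey q.2 = k → q.1 ∉ f)

theorem csgLoopB_char (s : List Char) (sg : List (String × List Int)) :
    csgLoopB s sg = true ↔ ∀ p ∈ sg, csgOk s p.1 p.2 := by
  induction sg with
  | nil => simp [csgLoopB]
  | cons hd tl ih =>
      obtain ⟨ch, forb⟩ := hd
      simp only [csgLoopB]
      by_cases hemp :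
          (((PySem.List.enumerate s 0).filter (fun p => csgKey p.2 == ch)).map Prod.fst).isEmpty
      · simp only [hemp, if_true]
        constructor
        · intro h; cases h
        · intro h
          exfalso
          have := (h (ch, forb) (List.mem_cons_self ..)).1
          obtain ⟨q, hq, hk⟩ := this
          rw [List.isEmpty_iff, List.map_eq_nil_iff, List.filter_eq_nil_iff] at hemp
          exact absurd (by simpa using hk) (by simpa using hemp q hq)
      · rw [Bool.not_eq_true] at hemp
        simp only [hemp, Bool.false_eq_true, if_false]
        by_cases hany :
            (((PySem.List.enumerate s 0).filter (fun p => csgKey p.2 == ch)).map Prod.fst).any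
              (fun i => forb.contains i)
        · simp only [hany, if_true]
          constructor
          · intro h; cases h
          · intro h
            exfalso
            rw [List.any_eq_true] at hany
            obtain ⟨i, hi, hc⟩ := hany
            simp only [List.mem_map, List.mem_filter, beq_iff_eq] at hi
            obtain ⟨q, ⟨hq, hk⟩, rfl⟩ := hi
            exact (h (ch, forb) (List.mem_cons_self ..)).2 q hq hk (by simpa using hc)
        · rw [Bool.not_eq_true] at hany
          simp only [hany, Bool.false_eq_true, if_false]
          rw [ih]
          constructor
          · intro h p hp
            rcases List.mem_cons.mp hp with rfl | hp
            · constructor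
              · have hne : ((PySem.List.enumerate s 0).filter (fun p => csgKey p.2 == ch)) ≠ [] := by
                  intro hnil; simp [hnil] at hemp
                obtain ⟨q, hq⟩ := List.exists_mem_of_ne_nil _ hne
                have := List.mem_filter.mp hq
                exact ⟨q, this.1, by simpa using this.2⟩
              · intro q hq hk hmem
                have := List.any_eq_false.mp hany q.1
                  (List.mem_map.mpr ⟨q, List.mem_filter.mpr ⟨hq, by simpa using hk⟩, rfl⟩)
                exact this (by simpa using hmem)
            · exact h p hp
          · intro h p hp; exact h p (List.mem_cons_of_mem _ hp)

theorem csgLoopA_char (sg : List (String × List Int)) (hk : ((PySem.Dict.mk sg).keys).Nodup)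
    (L : List (Int × Char)) (checked : PySem.Set String)
    (hnd : checked.Nodup) (hsub : ∀ x ∈ checked, x ∈ (PySem.Dict.mk sg).keys) :
    csgLoopA sg L checked = true ↔
      ((∀ q ∈ L, ∀ f, (PySem.Dict.mk sg).get? (csgKey q.2) = some f → q.1 ∉ f) ∧
       (∀ k ∈ (PySem.Dict.mk sg).keys, k ∈ checked ∨ ∃ q ∈ L, csgKey q.2 = k)) := by
  induction L generalizing checked with
  | nil =>
      simp only [csgLoopA, List.not_mem_nil, beq_iff_eq]
      constructor
      · intro h
        have hlen : (PySem.Dict.mk sg).keys.length = checked.length := by omega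
        refine ⟨by simp, fun k hkmem => Or.inl ?_⟩
        have hsubF : checked.toFinset ⊆ (PySem.Dict.mk sg).keys.toFinset := fun x hx =>
          List.mem_toFinset.mpr (hsub x (List.mem_toFinset.mp hx))
        have hcard : ((PySem.Dict.mk sg).keys.toFinset).card ≤ (checked.toFinset).card := by
          rw [List.toFinset_card_of_nodup hk, List.toFinset_card_of_nodup hnd]
          omega
        have := Finset.eq_of_subset_of_card_le hsubF hcard
        exact List.mem_toFinset.mp (this ▸ List.mem_toFinset.mpr hkmem)
      · rintro ⟨-, h2⟩
        have hsup : ∀ k ∈ (PySem.Dict.mk sg).keys, k ∈ checked := by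
          intro k hkm
          rcases h2 k hkm with h | ⟨q, hq, -⟩
          · exact h
          · cases hq
        have hsubF : checked.toFinset = (PySem.Dict.mk sg).keys.toFinset := by
          apply Finset.Subset.antisymm
          · exact fun x hx => List.mem_toFinset.mpr (hsub x (List.mem_toFinset.mp hx))
          · exact fun x hx => List.mem_toFinset.mpr (hsup x (List.mem_toFinset.mp hx))
        have : checked.length = (PySem.Dict.mk sg).keys.length := by
          rw [← List.toFinset_card_of_nodup hnd, ← List.toFinset_card_of_nodup hk, hsubF]
        omega
  | cons hd rest ih =>
      obtain ⟨i, c⟩ := hd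
      simp only [csgLoopA]
      cases hget : (PySem.Dict.mk sg).get? (csgKey c) with
      | none =>
          rw [ih checked hnd hsub]
          have hnotkey : csgKey c ∉ (PySem.Dict.mk sg).keys :=
            (PySem.Dict.get?_eq_none_iff_not_mem_keys _ _).mp hget
          constructor
          · rintro ⟨h1, h2⟩
            refine ⟨?_, ?_⟩
            · intro q hq f hf
              rcases List.mem_cons.mp hq with rfl | hq
              · rw [hget] at hf; cases hf
              · exact h1 q hq f hf
            · intro k hkm
              rcases h2 k hkm with h | ⟨q, hq, hkey⟩
              · exact Or.inl h
              · exact Or.inr ⟨q, List.mem_cons_of_mem _ hq, hkey⟩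
          · rintro ⟨h1, h2⟩
            refine ⟨fun q hq => h1 q (List.mem_cons_of_mem _ hq), ?_⟩
            intro k hkm
            rcases h2 k hkm with h | ⟨q, hq, hkey⟩
            · exact Or.inl h
            · rcases List.mem_cons.mp hq with rfl | hq
              · exact absurd (hkey ▸ hkm) hnotkey
              · exact Or.inr ⟨q, hq, hkey⟩
      | some f =>
          have hkeymem : csgKey c ∈ (PySem.Dict.mk sg).keys := by
            by_contra hmem
            rw [← PySem.Dict.get?_eq_none_iff_not_mem_keys _ _] at hmem
            rw [hget] at hmem; cases hmem
          by_cases hcf : f.contains i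
          · simp only [hcf, if_true]
            constructor
            · intro h; cases h
            · rintro ⟨h1, -⟩
              exact absurd (by simpa using hcf) (h1 (i, c) (List.mem_cons_self ..) f hget)
          · rw [Bool.not_eq_true] at hcf
            simp only [hcf, Bool.false_eq_true, if_false]
            rw [ih (checked.add (csgKey c)) (PySem.Set.nodup_add _ _ hnd)
              (by intro x hx
                  rcases (PySem.Set.mem_add _ _ _).mp hx with hx | rfl
                  · exact hsub x hx
                  · exact hkeymem)]
            constructor
            · rintro ⟨h1, h2⟩
              refine ⟨?_, ?_⟩
              · intro q hq g hg
                rcases List.mem_cons.mp hq with rfl | hq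
                · rw [hget] at hg; injection hg with hg; subst hg
                  simpa using hcf
                · exact h1 q hq g hg
              · intro k hkm
                rcases h2 k hkm with h | ⟨q, hq, hkey⟩
                · rcases (PySem.Set.mem_add _ _ _).mp h with h | rfl
                  · exact Or.inl h
                  · exact Or.inr ⟨(i, c), List.mem_cons_self .., rfl⟩
                · exact Or.inr ⟨q, List.mem_cons_of_mem _ hq, hkey⟩
            · rintro ⟨h1, h2⟩
              refine ⟨fun q hq => h1 q (List.mem_cons_of_mem _ hq), ?_⟩
              intro k hkm
              rcases h2 k hkm with h | ⟨q, hq, hkey⟩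
              · exact Or.inl ((PySem.Set.mem_add _ _ _).mpr (Or.inl h))
              · rcases List.mem_cons.mp hq with rfl | hq
                · exact Or.inl ((PySem.Set.mem_add _ _ _).mpr (Or.inr hkey.symm))
                · exact Or.inr ⟨q, hq, hkey⟩

-- ===== VERDICT (by name: the statement is the Claim_ definition above) =====
theorem check_semi_guessed_spec : Claim_equal_check_semi_guessed := by
  intro solution sg _ hpre
  unfold Spec_check_semi_guessed check_semi_guessed check_semi_guessed_alt
  have hk : ((PySem.Dict.mk sg).keys).Nodup := by simpa [PySem.Dict.keys] using hpre
  rw [Bool.eq_iff_iff]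
  rw [csgLoopA_char sg hk _ PySem.Set.empty (by simp [PySem.Set.empty]) (by simp [PySem.Set.empty])]
  rw [csgLoopB_char]
  constructor
  · rintro ⟨h1, h2⟩ p hp
    have hkm : p.1 ∈ (PySem.Dict.mk sg).keys := by
      simp only [PySem.Dict.keys]
      exact List.mem_map.mpr ⟨p, hp, rfl⟩
    constructor
    · rcases h2 p.1 hkm with h | h
      · simp [PySem.Set.empty] at h
      · exact h
    · intro q hq hkey
      have hget : (PySem.Dict.mk sg).get? p.1 = some p.2 :=
        PySem.Dict.get?_of_mem_items _ hp hk
      exact h1 q hq p.2 (hkey ▸ hget)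
  · intro h
    constructor
    · intro q hq f hf
      have hitems : (csgKey q.2, f) ∈ sg :=
        PySem.Dict.mem_items_of_get?_eq_some _ hf
      exact (h _ hitems).2 q hq rfl
    · intro k hkm
      simp only [PySem.Dict.keys, List.mem_map] at hkm
      obtain ⟨p, hp, rfl⟩ := hkm
      exact Or.inr (h p hp).1
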